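-- pv_equiv track=rewrite | github.com/Febbu/vosslab_podcast | pipelines/03_blog_to_script.py | _split_forks
-- ===== SOURCE A (Python) =====
-- from typing import Any
--
-- def _split_forks(repo_details: list[dict[str, Any]]) -> tuple[list[dict[str, Any]], list[dict[str, Any]]]:
--     originals: list[dict[str, Any]] = []
--     forks: list[dict[str, Any]] = []
--     for card in repo_details:
--         if card.get("fork"):
--             forks.append(card)
--         else:
--             originals.append(card)
--     return originals, forks
-- ===== SOURCE B (Python) =====
-- from typing import Any
--
-- def _split_forks(repo_details: list[dict[str, Any]]) -> tuple[list[dict[str, Any]], list[dict[str, Any]]]: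
--     # Stable sort by the binary key "is a fork": stability keeps each group's
--     # original relative order, so the sorted list is originals followed by forks.
--     arranged = sorted(repo_details, key=lambda card: 1 if card.get("fork") else 0)
--     k = sum(1 for card in arranged if not card.get("fork"))
--     return arranged[:k], arranged[k:]
-- ===== Notes on version B (the rewrite author's own statement) =====
-- stated objective: alternative
-- what changed: Replaces the single partition loop with two accumulators by a stable sort on the binary is-fork key followed by slicing the sorted list at the count of non-forks; stability of Python's sort guarantees the same element order.
import Mathlib
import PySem

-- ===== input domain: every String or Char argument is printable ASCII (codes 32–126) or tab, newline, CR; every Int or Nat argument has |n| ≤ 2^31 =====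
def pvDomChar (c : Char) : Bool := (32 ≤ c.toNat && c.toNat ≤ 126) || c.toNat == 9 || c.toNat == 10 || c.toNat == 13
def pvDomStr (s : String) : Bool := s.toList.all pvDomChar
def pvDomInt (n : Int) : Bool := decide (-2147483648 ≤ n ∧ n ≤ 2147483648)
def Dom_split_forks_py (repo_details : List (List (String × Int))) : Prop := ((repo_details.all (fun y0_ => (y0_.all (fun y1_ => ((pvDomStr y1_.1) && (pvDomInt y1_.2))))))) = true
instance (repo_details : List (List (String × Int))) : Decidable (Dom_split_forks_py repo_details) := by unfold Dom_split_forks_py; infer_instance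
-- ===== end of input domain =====

-- B replaces A's single partition loop by a stable sort on the binary is-fork key
-- followed by slicing at the count of non-forks (alternative algorithm; not faster).

-- truthiness of card.get("fork"): first matching value present and nonzero (exact for int-valued dicts)
def forkTruthy (card : List (String × Int)) : Bool :=
  match (PySem.Dict.mk card).get? "fork" with
  | some v => v != 0
  | none => false

-- ===== PORT A =====
def split_forks_py (repo_details : List (List (String × Int))) : (List (List (String × Int))) × (List (List (String × Int))) :=
  (repo_details.foldl
    (fun acc card => if forkTruthy card then (acc.1, acc.2 ++ [card]) else (acc.1 ++ [card], acc.2))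
    ([], []))

-- ===== PORT B =====
def split_forks_py_alt (repo_details : List (List (String × Int))) : (List (List (String × Int))) × (List (List (String × Int))) :=
  let arranged := PySem.List.sorted repo_details (fun card => if forkTruthy card then (1 : Int) else 0) false
  let k : Int := arranged.foldl (fun acc card => if ! forkTruthy card then acc + 1 else acc) 0
  (PySem.List.slice arranged none (some k), PySem.List.slice arranged (some k) none)

-- ===== PRECONDITION & SPEC =====
def Spec_split_forks_py (repo_details : List (List (String × Int))) (out : (List (List (String × Int))) × (List (List (String × Int)))) : Prop := out = split_forks_py_alt repo_details
instance (repo_details : List (List (String × Int))) (out : (List (List (String × Int))) × (List (List (String × Int)))) : Decidable (Spec_split_forks_py repo_details out) := by unfold Spec_split_forks_py; infer_instance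

-- ===== CLAIM =====
def Claim_equal_split_forks_py : Prop := ∀ (repo_details : List (List (String × Int))), Dom_split_forks_py repo_details → Spec_split_forks_py repo_details (split_forks_py repo_details)

-- ===== LEMMAS AND PROOFS =====

-- A's loop is the partition: originals then forks, each in original order.
lemma split_foldl (xs : List (List (String × Int))) (o f : List (List (String × Int))) :
    xs.foldl (fun acc card => if forkTruthy card then (acc.1, acc.2 ++ [card]) else (acc.1 ++ [card], acc.2)) (o, f)
      = (o ++ xs.filter (fun card => ! forkTruthy card), f ++ xs.filter forkTruthy) := by
  induction xs generalizing o f with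
  | nil => simp
  | cons x xs ih =>
      by_cases h : forkTruthy x = true <;> simp [List.foldl, h, ih]

-- inserting x that goes before none of A but before the head of B lands between them
lemma insertBy_append_mid {α : Type} (before : α → α → Bool) (x : α) (A B : List α)
    (hA : ∀ a ∈ A, before x a = false) (hB : ∀ b ∈ B.head?, before x b = true) :
    PySem.List.insertBy before x (A ++ B) = A ++ x :: B := by
  induction A with
  | nil =>
      cases B with
      | nil => simp [PySem.List.insertBy]
      | cons b t => simp [PySem.List.insertBy, hB b (by simp)]
  | cons a A ih =>
      have ha := hA a (by simp)
      simp only [List.cons_append, PySem.List.insertBy, ha]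
      simp [ih (fun a' ha' => hA a' (by simp [ha']))]

-- the stable binary-key sort IS the partition
lemma sorted_binary (xs : List (List (String × Int))) :
    PySem.List.sorted xs (fun card => if forkTruthy card then (1 : Int) else 0) false
      = xs.filter (fun card => ! forkTruthy card) ++ xs.filter forkTruthy := by
  rw [PySem.List.sorted_eq_foldl_insertBy]
  induction xs using List.reverseRecOn with
  | nil => simp
  | append_singleton xs x ih =>
      rw [List.foldl_append, List.foldl_cons, List.foldl_nil, ih]
      by_cases h : forkTruthy x = true
      · rw [PySem.List.insertBy_of_forall_not_before]
        · simp [h]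
        · intro y hy
          by_cases hy' : forkTruthy y = true <;> simp [h, hy']
      · rw [insertBy_append_mid]
        · simp [h]
        · intro a ha
          have : forkTruthy a = false := by
            simp only [List.mem_filter] at ha
            simpa using ha.2
          simp [h, this]
        · intro b hb
          have : forkTruthy b = true := by
            cases hB : xs.filter forkTruthy with
            | nil => simp [hB] at hb
            | cons c t =>
                simp [hB] at hb
                have := List.mem_filter.mp (hB ▸ List.mem_cons_self (l := t))
                simpa [hb] using this.2
          simp [h, this]

-- the generator-sum counts exactly the elements satisfying the predicate
lemma count_foldl {α : Type} (p : α → Bool) (ys : List α) (init : Int) :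
    ys.foldl (fun acc c => if p c then acc + 1 else acc) init = init + (ys.filter p).length := by
  induction ys generalizing init with
  | nil => simp
  | cons y ys ih =>
      by_cases h : p y = true
      · simp [List.foldl, h, ih]; omega
      · simp [List.foldl, h, ih]

-- ===== VERDICT =====
theorem split_forks_py_spec : Claim_equal_split_forks_py := by
  intro xs _
  unfold Spec_split_forks_py split_forks_py split_forks_py_alt
  rw [split_foldl, sorted_binary]
  have hA : ∀ a ∈ xs.filter (fun card => ! forkTruthy card), (! forkTruthy a) = true := by
    intro a ha; exact (List.mem_filter.mp ha).2
  have hB : ∀ b ∈ xs.filter forkTruthy, forkTruthy b = true := by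
    intro b hb; exact (List.mem_filter.mp hb).2
  simp only [count_foldl]
  rw [List.filter_append]
  rw [List.filter_eq_self.mpr hA]
  have hBnil : (xs.filter forkTruthy).filter (fun card => ! forkTruthy card) = [] := by
    apply List.filter_eq_nil_iff.mpr
    intro b hb; simp [hB b hb]
  rw [hBnil]
  simp only [List.append_nil, Int.zero_add]
  rw [PySem.List.slice_to_natCast, PySem.List.slice_from_natCast]
  simp
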